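-- pv_equiv track=rewrite | github.com/nicklave/Progetti_esercizi_unical | Esercizi_python/list_TrueFalse.py | funzione
-- ===== SOURCE A (Python) =====
-- def funzione(lista1, lista2):
--     unici = []
--     scarti = []
--     for elem in lista1:
--         if elem not in unici:
--             unici.append(elem)
--         elif elem not in scarti:
--             scarti.append(elem)
--
--     for i in range(len(lista1)):
--         if lista2[i] == True and lista1[i] in scarti:
--             return False
--     return True
-- ===== SOURCE B (Python) =====
-- def funzione(lista1, lista2):
--     # Set-based linear algorithm: collect flagged values, then one pass
--     # detecting a repeated flagged value via a 'seen' set.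
--     flagged = set()
--     for x, f in zip(lista1, lista2):
--         if f == True:
--             flagged.add(x)
--     seen = set()
--     for x in lista1:
--         if x in seen and x in flagged:
--             return False
--         seen.add(x)
--     return True
-- ===== Notes on version B (the rewrite author's own statement) =====
-- stated objective: faster
-- what changed: Replaces A's quadratic construction of a 'scarti' duplicates list and positional rescan by two hash sets: one pass over zip(lista1, lista2) collecting flagged values, then one pass over lista1 with a 'seen' set that returns False on the first repeated flagged value.
import Mathlib
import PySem

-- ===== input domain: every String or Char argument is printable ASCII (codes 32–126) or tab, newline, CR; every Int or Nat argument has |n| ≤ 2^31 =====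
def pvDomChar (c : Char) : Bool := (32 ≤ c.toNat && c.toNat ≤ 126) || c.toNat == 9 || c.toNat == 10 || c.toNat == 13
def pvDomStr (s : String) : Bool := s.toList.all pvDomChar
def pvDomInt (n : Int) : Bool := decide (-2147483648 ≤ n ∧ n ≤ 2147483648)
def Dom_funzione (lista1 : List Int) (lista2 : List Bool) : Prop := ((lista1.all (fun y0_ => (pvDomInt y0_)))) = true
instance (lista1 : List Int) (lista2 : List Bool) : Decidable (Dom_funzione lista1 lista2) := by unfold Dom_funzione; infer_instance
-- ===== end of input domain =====

-- B replaces A's quadratic duplicates-list construction and positional rescan by two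
-- hash sets (flagged values from zip, then a single 'seen'-set pass); measured faster.


-- ===== PORT A =====
-- first pass: build (unici, scarti) exactly as A does
def funzioneBuild (lista1 : List Int) : List Int × List Int :=
  lista1.foldl (fun acc elem =>
    if elem ∉ acc.1 then (acc.1 ++ [elem], acc.2)
    else if elem ∉ acc.2 then (acc.1, acc.2 ++ [elem])
    else acc) ([], [])

-- second pass: for i in range(len(lista1)); lista2[i] out of range = IndexError (excluded
-- by Pre_); index i counts up from 0, so lista2[i]? is exact for Python's lista2[i] here
def funzioneLoopA (lista1 : List Int) (lista2 : List Bool) (scarti : List Int) (i : Nat) : Bool :=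
  if h : i < lista1.length then
    match lista2[i]? with
    | none => true  -- Python raises IndexError here; outside Pre_funzione
    | some b => if b = true ∧ lista1[i] ∈ scarti then false
                else funzioneLoopA lista1 lista2 scarti (i + 1)
  else true
termination_by lista1.length - i

def funzione (lista1 : List Int) (lista2 : List Bool) : Bool :=
  funzioneLoopA lista1 lista2 (funzioneBuild lista1).2 0

-- ===== PORT B =====
-- first loop of B: 'for x, f in zip(...): if f == True: flagged.add(x)'
def funzioneFlagged (pairs : List (Int × Bool)) : PySem.Set Int :=
  pairs.foldl (fun s p => if p.2 = true then PySem.Set.add s p.1 else s) PySem.Set.empty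

-- second loop of B: 'for x in lista1: if x in seen and x in flagged: return False; seen.add(x)'
def funzioneLoopB (l : List Int) (flagged seen : PySem.Set Int) : Bool :=
  match l with
  | [] => true
  | x :: t =>
      if x ∈ seen ∧ x ∈ flagged then false
      else funzioneLoopB t flagged (PySem.Set.add seen x)

def funzione_alt (lista1 : List Int) (lista2 : List Bool) : Bool :=
  funzioneLoopB lista1 (funzioneFlagged (lista1.zip lista2)) PySem.Set.empty

-- ===== PRECONDITION & SPEC =====
-- Pre_ excludes exactly the inputs on which A raises IndexError: lista2 shorter than
-- lista1 and no early False return (no flagged duplicated position before the overrun).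
def Pre_funzione (lista1 : List Int) (lista2 : List Bool) : Prop :=
  lista1.length ≤ lista2.length ∨
    ∃ i < lista2.length, lista2.getD i false = true ∧ 1 < lista1.count (lista1.getD i 0)
instance (lista1 : List Int) (lista2 : List Bool) : Decidable (Pre_funzione lista1 lista2) := by
  unfold Pre_funzione; infer_instance
def pvWitness_funzione : List Int × List Bool := ([1, 1, 2], [true, false, true])

def Spec_funzione (lista1 : List Int) (lista2 : List Bool) (out : Bool) : Prop := out = funzione_alt lista1 lista2
instance (lista1 : List Int) (lista2 : List Bool) (out : Bool) : Decidable (Spec_funzione lista1 lista2 out) := by unfold Spec_funzione; infer_instance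

-- ===== CLAIM (what is proved, stated in full; the proofs are below) =====
def Claim_equal_funzione : Prop := ∀ (lista1 : List Int) (lista2 : List Bool), Dom_funzione lista1 lista2 → Pre_funzione lista1 lista2 → Spec_funzione lista1 lista2 (funzione lista1 lista2)

-- ===== LEMMAS AND PROOFS =====

-- the common Boolean content: some zipped position is flagged and holds a duplicated value
def TriggerP (l1 : List Int) (l2 : List Bool) : Prop :=
  ∃ p ∈ l1.zip l2, p.2 = true ∧ 2 ≤ l1.count p.1

-- invariant of A's first pass: with counts c of the already-processed prefix,
-- u = {x | 1 <= c x} and s = {x | 2 <= c x}, folding l gives scarti = {x | 2 <= c x + l.count x}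
theorem funzioneBuild_inv (l : List Int) :
    ∀ (u s : List Int) (c : Int → Nat),
      (∀ x, x ∈ u ↔ 1 ≤ c x) → (∀ x, x ∈ s ↔ 2 ≤ c x) →
      ∀ x, x ∈ (l.foldl (fun acc elem =>
        if elem ∉ acc.1 then (acc.1 ++ [elem], acc.2)
        else if elem ∉ acc.2 then (acc.1, acc.2 ++ [elem])
        else acc) (u, s)).2 ↔ 2 ≤ c x + l.count x := by
  induction l with
  | nil => intro u s c hu hs x; simpa using hs x
  | cons e t ih =>
    intro u s c hu hs x
    rw [List.foldl_cons]
    by_cases he : e ∈ u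
    · by_cases hes : e ∈ s
      · have hce : 2 ≤ c e := (hs e).mp hes
        have hu' : ∀ y, y ∈ u ↔ 1 ≤ c y + (if y = e then 1 else 0) := by
          intro y; rw [hu y]; rcases eq_or_ne y e with hy | hy
          · subst hy; constructor <;> intro <;> omega
          · simp [hy]
        have hs' : ∀ y, y ∈ s ↔ 2 ≤ c y + (if y = e then 1 else 0) := by
          intro y; rw [hs y]; rcases eq_or_ne y e with hy | hy
          · subst hy; constructor <;> intro <;> omega
          · simp [hy]
        have h := ih u s (fun y => c y + (if y = e then 1 else 0)) hu' hs' x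
        rw [if_neg (by simpa using he), if_neg (by simpa using hes), h, List.count_cons]
        rcases eq_or_ne x e with hx | hx
        · subst hx; simp; omega
        · simp only [beq_iff_eq, if_neg hx, if_neg (Ne.symm hx)]; omega
      · have hce1 : 1 ≤ c e := (hu e).mp he
        have hce2 : ¬ 2 ≤ c e := fun h => hes ((hs e).mpr h)
        have hu' : ∀ y, y ∈ u ↔ 1 ≤ c y + (if y = e then 1 else 0) := by
          intro y; rw [hu y]; rcases eq_or_ne y e with hy | hy
          · subst hy; constructor <;> intro <;> omega
          · simp [hy]
        have hs' : ∀ y, y ∈ s ++ [e] ↔ 2 ≤ c y + (if y = e then 1 else 0) := by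
          intro y; rcases eq_or_ne y e with hy | hy
          · subst hy; simp; omega
          · simp [hy, hs y]
        have h := ih u (s ++ [e]) (fun y => c y + (if y = e then 1 else 0)) hu' hs' x
        rw [if_neg (by simpa using he), if_pos (by simpa using hes), h, List.count_cons]
        rcases eq_or_ne x e with hx | hx
        · subst hx; simp; omega
        · simp only [beq_iff_eq, if_neg hx, if_neg (Ne.symm hx)]; omega
    · have hce : ¬ 1 ≤ c e := fun h => he ((hu e).mpr h)
      have hu' : ∀ y, y ∈ u ++ [e] ↔ 1 ≤ c y + (if y = e then 1 else 0) := by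
        intro y; rcases eq_or_ne y e with hy | hy
        · subst hy; simp
        · simp [hy, hu y]
      have hs' : ∀ y, y ∈ s ↔ 2 ≤ c y + (if y = e then 1 else 0) := by
        intro y; rw [hs y]; rcases eq_or_ne y e with hy | hy
        · subst hy; simp only [reduceIte]; omega
        · simp [hy]
      have h := ih (u ++ [e]) s (fun y => c y + (if y = e then 1 else 0)) hu' hs' x
      rw [if_pos (by simpa using he), h, List.count_cons]
      rcases eq_or_ne x e with hx | hx
      · subst hx; simp; omega
      · simp only [beq_iff_eq, if_neg hx, if_neg (Ne.symm hx)]; omega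

theorem mem_scarti (l : List Int) (x : Int) :
    x ∈ (funzioneBuild l).2 ↔ 2 ≤ l.count x := by
  have h := funzioneBuild_inv l [] [] (fun _ => 0) (by simp) (by simp) x
  simpa [funzioneBuild] using h

-- A's scan loop returns false iff some later position triggers
theorem loopA_false_iff (l1 : List Int) (l2 : List Bool) (scarti : List Int) :
    ∀ (n i : Nat), l1.length - i ≤ n →
      (funzioneLoopA l1 l2 scarti i = false ↔
        ∃ j, ∃ h : j < l1.length, i ≤ j ∧ l2[j]? = some true ∧ l1[j] ∈ scarti) := by
  intro n
  induction n with
  | zero =>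
    intro i hi
    have h : ¬ i < l1.length := by omega
    rw [funzioneLoopA, dif_neg h]
    simp only [Bool.true_eq_false, false_iff]
    rintro ⟨j, hj, hij, -⟩; omega
  | succ n ih =>
    intro i hi
    rw [funzioneLoopA]
    by_cases h : i < l1.length
    · rw [dif_pos h]
      cases hg : l2[i]? with
      | none =>
        simp only [Bool.true_eq_false, false_iff]
        rintro ⟨j, hj, hij, hgj, -⟩
        have hi2 : ¬ i < l2.length := by
          intro hc; exact absurd hg (by simp [List.getElem?_eq_getElem hc])
        have : j < l2.length := by
          rcases List.getElem?_eq_some_iff.mp hgj with ⟨hjl, -⟩; exact hjl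
        omega
      | some b =>
        show ((if b = true ∧ l1[i] ∈ scarti then false
               else funzioneLoopA l1 l2 scarti (i + 1)) = false ↔
          ∃ j, ∃ h : j < l1.length, i ≤ j ∧ l2[j]? = some true ∧ l1[j] ∈ scarti)
        by_cases hb : b = true ∧ l1[i] ∈ scarti
        · rw [if_pos hb]
          simp only [true_iff]
          exact ⟨i, h, le_refl i, by rw [hg, hb.1], hb.2⟩
        · rw [if_neg hb, ih (i + 1) (by omega)]
          constructor
          · rintro ⟨j, hj, hij, hgj, hm⟩; exact ⟨j, hj, by omega, hgj, hm⟩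
          · rintro ⟨j, hj, hij, hgj, hm⟩
            rcases Nat.eq_or_lt_of_le hij with rfl | hlt
            · rw [hg] at hgj
              exact absurd ⟨by injection hgj, hm⟩ hb
            · exact ⟨j, hj, by omega, hgj, hm⟩
    · rw [dif_neg h]
      simp only [Bool.true_eq_false, false_iff]
      rintro ⟨j, hj, hij, -⟩; omega

theorem funzione_false_iff (l1 : List Int) (l2 : List Bool) :
    funzione l1 l2 = false ↔ TriggerP l1 l2 := by
  rw [funzione, loopA_false_iff l1 l2 _ l1.length 0 (by omega)]
  constructor
  · rintro ⟨j, hj, -, hgj, hm⟩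
    rcases List.getElem?_eq_some_iff.mp hgj with ⟨hj2, hv⟩
    refine ⟨(l1[j], l2[j]), ?_, hv, (mem_scarti l1 _).mp hm⟩
    have hjz : j < (l1.zip l2).length := by rw [List.length_zip]; omega
    have : (l1.zip l2)[j] = (l1[j], l2[j]) := List.getElem_zip
    exact this ▸ List.getElem_mem hjz
  · rintro ⟨p, hp, hp2, hc⟩
    rcases List.mem_iff_getElem.mp hp with ⟨j, hjz, hpj⟩
    have hj1 : j < l1.length := by rw [List.length_zip] at hjz; omega
    have hj2 : j < l2.length := by rw [List.length_zip] at hjz; omega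
    have hz : (l1.zip l2)[j] = (l1[j], l2[j]) := List.getElem_zip
    rw [hz] at hpj
    refine ⟨j, hj1, Nat.zero_le j, ?_, (mem_scarti l1 _).mpr ?_⟩
    · rw [List.getElem?_eq_getElem hj2]
      have : l2[j] = p.2 := by rw [← hpj]
      rw [this, hp2]
    · have : l1[j] = p.1 := by rw [← hpj]
      rw [this]; exact hc

-- membership in B's flagged set
theorem mem_flagged_aux (pairs : List (Int × Bool)) :
    ∀ (s : PySem.Set Int) (x : Int),
      (x ∈ pairs.foldl (fun s p => if p.2 = true then PySem.Set.add s p.1 else s) s ↔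
        x ∈ s ∨ ∃ p ∈ pairs, p.2 = true ∧ p.1 = x) := by
  induction pairs with
  | nil => intro s x; simp
  | cons q t ih =>
    intro s x
    rw [List.foldl_cons]
    by_cases hq : q.2 = true
    · rw [if_pos hq, ih]
      simp only [PySem.Set.mem_add, List.mem_cons]
      constructor
      · rintro (⟨hs | rfl⟩ | ⟨p, hp, h2, h1⟩)
        · exact Or.inl hs
        · exact Or.inr ⟨q, Or.inl rfl, hq, rfl⟩
        · exact Or.inr ⟨p, Or.inr hp, h2, h1⟩
      · rintro (hs | ⟨p, hp | hp, h2, h1⟩)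
        · exact Or.inl (Or.inl hs)
        · subst hp; exact Or.inl (Or.inr h1.symm)
        · exact Or.inr ⟨p, hp, h2, h1⟩
    · rw [if_neg hq, ih]
      simp only [List.mem_cons]
      constructor
      · rintro (hs | ⟨p, hp, h2, h1⟩)
        · exact Or.inl hs
        · exact Or.inr ⟨p, Or.inr hp, h2, h1⟩
      · rintro (hs | ⟨p, hp | hp, h2, h1⟩)
        · exact Or.inl hs
        · subst hp; exact absurd h2 hq
        · exact Or.inr ⟨p, hp, h2, h1⟩

theorem mem_flagged (pairs : List (Int × Bool)) (x : Int) :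
    x ∈ funzioneFlagged pairs ↔ ∃ p ∈ pairs, p.2 = true ∧ p.1 = x := by
  rw [funzioneFlagged, mem_flagged_aux]
  simp [PySem.Set.empty]

-- B's scan loop returns false iff some flagged value is already seen or duplicated ahead
theorem loopB_false_iff (flagged : PySem.Set Int) :
    ∀ (l : List Int) (seen : PySem.Set Int),
      (funzioneLoopB l flagged seen = false ↔
        ∃ x, x ∈ flagged ∧ ((x ∈ seen ∧ x ∈ l) ∨ 2 ≤ l.count x)) := by
  intro l
  induction l with
  | nil =>
    intro seen
    rw [funzioneLoopB]
    simp only [Bool.true_eq_false, false_iff]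
    rintro ⟨x, -, ⟨-, hx⟩ | hc⟩
    · exact absurd hx (List.not_mem_nil)
    · simp at hc
  | cons e t ih =>
    intro seen
    rw [funzioneLoopB]
    by_cases hg : e ∈ seen ∧ e ∈ flagged
    · rw [if_pos hg]
      simp only [true_iff]
      exact ⟨e, hg.2, Or.inl ⟨hg.1, List.mem_cons_self⟩⟩
    · rw [if_neg hg, ih]
      constructor
      · rintro ⟨x, hf, ⟨hsx, hxt⟩ | hc⟩
        · rcases (PySem.Set.mem_add _ _ _).mp hsx with hs | rfl
          · exact ⟨x, hf, Or.inl ⟨hs, List.mem_cons_of_mem e hxt⟩⟩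
          · refine ⟨x, hf, Or.inr ?_⟩
            rw [List.count_cons_self]
            have : 1 ≤ t.count x := List.count_pos_iff.mpr hxt
            omega
        · refine ⟨x, hf, Or.inr ?_⟩
          rcases eq_or_ne x e with rfl | hne
          · rw [List.count_cons_self]; omega
          · rw [List.count_cons_of_ne (Ne.symm hne)]; exact hc
      · rintro ⟨x, hf, ⟨hsx, hxl⟩ | hc⟩
        · rcases List.mem_cons.mp hxl with rfl | hxt
          · exact absurd ⟨hsx, hf⟩ hg
          · exact ⟨x, hf, Or.inl ⟨(PySem.Set.mem_add _ _ _).mpr (Or.inl hsx), hxt⟩⟩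
        · rcases eq_or_ne x e with rfl | hne
          · rw [List.count_cons_self] at hc
            have hxt : x ∈ t := List.count_pos_iff.mp (by omega)
            exact ⟨x, hf, Or.inl ⟨(PySem.Set.mem_add _ _ _).mpr (Or.inr rfl), hxt⟩⟩
          · rw [List.count_cons_of_ne (Ne.symm hne)] at hc
            exact ⟨x, hf, Or.inr hc⟩

theorem funzione_alt_false_iff (l1 : List Int) (l2 : List Bool) :
    funzione_alt l1 l2 = false ↔ TriggerP l1 l2 := by
  rw [funzione_alt, loopB_false_iff]
  constructor
  · rintro ⟨x, hf, ⟨hs, -⟩ | hc⟩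
    · exact absurd hs (by simp [PySem.Set.empty])
    · rcases (mem_flagged _ x).mp hf with ⟨p, hp, h2, h1⟩
      exact ⟨p, hp, h2, h1 ▸ hc⟩
  · rintro ⟨p, hp, h2, hc⟩
    exact ⟨p.1, (mem_flagged _ p.1).mpr ⟨p, hp, h2, rfl⟩, Or.inr hc⟩

-- ===== VERDICT (by name: the statement is the Claim_ definition above) =====
theorem funzione_spec : Claim_equal_funzione := by
  intro l1 l2 _ _
  unfold Spec_funzione
  have ha := funzione_false_iff l1 l2
  have hb := funzione_alt_false_iff l1 l2
  cases h1 : funzione l1 l2 <;> cases h2 : funzione_alt l1 l2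
  · rfl
  · exact absurd (hb.mpr (ha.mp h1)) (by rw [h2]; simp)
  · exact absurd (ha.mpr (hb.mp h2)) (by rw [h1]; simp)
  · rfl
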